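-- pv_equiv track=rewrite | github.com/psw9999/Algorithms | 1_Site/Programmers_위클리 챌린지 4주차_Python.py | solution
-- ===== SOURCE A (Python) =====
-- def solution(table, languages, preference):
--     max_score = 0
--     result = ''
--     for i in range(len(table)) :
--         # .split()은 리스트형으로 반환하므로 굳이 list 타입으로 변환할 필요가 없음.
--         #temp = list(table[i].split(' '))
--         temp = table[i].split(' ')
--         temp_score = 0
--
--         # 반복문을 1부터 시작하면 굳이 0을 비교하는 if문이 필요 없어짐.
--         #for j in range(len(temp)) :
--         for j in range(1, len(temp)) :
--             #if j != 0 :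
--                 # for e in range(len(languages)) :
--                 #     if languages[e] == temp[j] :
--                 #         temp_score += preference[e] * (6-j)
--             for e in range(len(languages)) :
--                 if languages[e] == temp[j] :
--                     temp_score += preference[e] * (6-j)
--
--         if temp_score > max_score :
--             max_score = temp_score
--             result = temp[0]
--         # and 연산자로 if문을 하나로 줄일 수 있음.
--         #elif temp_score == max_score :
--             #if result > temp[0] :
--         elif temp_score == max_score and result > temp[0] :
--                 result = temp[0]
--
--     return result
-- ===== SOURCE B (Python) =====
-- def solution(table, languages, preference):
--     # Build a (score, name) table once, then select the winner in a separate
--     # phase: global best score first, then the lexicographically smallest name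
--     # among the jobs attaining it; a non-positive best yields ''.
--     def entry(row):
--         words = row.split(' ')
--         s = sum(preference[e] * (6 - j)
--                 for j in range(1, len(words))
--                 for e in range(len(languages))
--                 if languages[e] == words[j])
--         return (s, words[0])
--
--     rows = [entry(row) for row in table]
--     best = max((s for s, _ in rows), default=0)
--     if best <= 0:
--         return ''
--     return min(n for s, n in rows if s == best)
-- ===== Notes on version B (the rewrite author's own statement) =====
-- stated objective: alternative
-- what changed: A streams over jobs keeping a running (max_score, result) pair with an in-loop tie-break; B first builds the whole (score, name) table, then selects in a separate phase: take the global maximum score, return '' if it is not positive, otherwise the lexicographically smallest name among the rows attaining it.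
import Mathlib
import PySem

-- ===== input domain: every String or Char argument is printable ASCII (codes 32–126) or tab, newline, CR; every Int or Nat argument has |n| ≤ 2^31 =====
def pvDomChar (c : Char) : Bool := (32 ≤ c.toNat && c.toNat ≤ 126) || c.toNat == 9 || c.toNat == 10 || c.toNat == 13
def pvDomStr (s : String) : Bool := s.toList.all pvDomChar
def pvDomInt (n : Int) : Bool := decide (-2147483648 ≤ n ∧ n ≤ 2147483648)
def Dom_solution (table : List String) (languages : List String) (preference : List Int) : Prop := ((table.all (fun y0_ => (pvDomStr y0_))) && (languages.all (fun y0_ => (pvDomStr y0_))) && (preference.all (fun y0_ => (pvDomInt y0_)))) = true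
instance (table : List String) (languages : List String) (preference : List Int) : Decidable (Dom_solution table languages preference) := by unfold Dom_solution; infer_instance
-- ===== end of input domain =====

-- ===== PORT A =====
-- Port of A: one streaming pass keeping (max_score, result) with the >/tie-break updates.
def solution (table : List String) (languages : List String) (preference : List Int) : String :=
  ((PySem.List.pyRange 0 (PySem.List.len table) 1).foldl (fun (st : Int × String) i =>
      let temp := (PySem.Str.split? (PySem.List.pyGetD table i "") " ").getD []
      let temp_score := (PySem.List.pyRange 1 (PySem.List.len temp) 1).foldl (fun ts j =>
          (PySem.List.pyRange 0 (PySem.List.len languages) 1).foldl (fun ts e =>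
              if PySem.List.pyGetD languages e "" == PySem.List.pyGetD temp j "" then
                ts + PySem.List.pyGetD preference e 0 * (6 - j)
              else ts) ts) 0
      if temp_score > st.1 then (temp_score, PySem.List.pyGetD temp 0 "")
      else if temp_score == st.1 && decide (PySem.List.pyGetD temp 0 "" < st.2) then
        (st.1, PySem.List.pyGetD temp 0 "")
      else st)
    ((0 : Int), ("" : String))).2

-- ===== PORT B =====
-- B builds a (score, name) table once, then selects in a second phase:
-- global best score, then the smallest name among rows attaining it; best ≤ 0 gives "".
def pvEntry (languages : List String) (preference : List Int) (row : String) : Int × String :=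
  let words := (PySem.Str.split? row " ").getD []
  let s := (PySem.List.pyRange 1 (PySem.List.len words) 1).foldl (fun acc j =>
      (PySem.List.pyRange 0 (PySem.List.len languages) 1).foldl (fun acc e =>
          if PySem.List.pyGetD languages e "" == PySem.List.pyGetD words j "" then
            acc + PySem.List.pyGetD preference e 0 * (6 - j)
          else acc) acc) 0
  (s, PySem.List.pyGetD words 0 "")

def solution_alt (table : List String) (languages : List String) (preference : List Int) : String :=
  let rows := table.map (pvEntry languages preference)
  let best := PySem.List.maxD (rows.map Prod.fst) (fun s => s) 0
  if best ≤ 0 then ""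
  else (PySem.List.min? ((rows.filter (fun p => p.1 == best)).map Prod.snd) (fun n => n)).getD ""

-- ===== PRECONDITION & SPEC =====
-- Pre_ excludes exactly the inputs where Python A raises IndexError: some word in a
-- job row's language list equals a language whose index is beyond len(preference)
-- (B's Python raises there too).
def Pre_solution (table : List String) (languages : List String) (preference : List Int) : Prop :=
  ∀ row ∈ table, ∀ w ∈ ((PySem.Str.split? row " ").getD []).drop 1,
    w ∉ languages.drop preference.length

instance (table : List String) (languages : List String) (preference : List Int) :
    Decidable (Pre_solution table languages preference) := by
  unfold Pre_solution; infer_instance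

def pvWitness_solution : List String × List String × List Int :=
  (["frontend js vue", "backend java py"], ["py", "js"], [4, 2])

def Spec_solution (table : List String) (languages : List String) (preference : List Int) (out : String) : Prop := out = solution_alt table languages preference
instance (table : List String) (languages : List String) (preference : List Int) (out : String) : Decidable (Spec_solution table languages preference out) := by unfold Spec_solution; infer_instance

-- ===== CLAIM (what is proved, stated in full; the proofs are below) =====
def Claim_equal_solution : Prop := ∀ (table : List String) (languages : List String) (preference : List Int), Dom_solution table languages preference → Pre_solution table languages preference → Spec_solution table languages preference (solution table languages preference)

-- ===== LEMMAS AND PROOFS =====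

-- A's per-row update, as a binary "keep the better (score, name) pair" step.
def pvStep (st p : Int × String) : Int × String :=
  if p.1 > st.1 then p
  else if p.1 == st.1 && decide (p.2 < st.2) then (st.1, p.2)
  else st

-- Best score over the rows, clamped below by A's initial max_score = 0.
def pvBest (rows : List (Int × String)) : Int := (rows.map Prod.fst).foldl max 0

-- Smallest name among rows attaining pvBest, with A's initial (0, "") included.
def pvName (rows : List (Int × String)) : String :=
  match (((0, "") :: rows).filter (fun p => p.1 == pvBest rows)).map Prod.snd with
  | [] => ""
  | x :: t => t.foldl min x

theorem pvStrEmptyLe (s : String) : "" ≤ s := by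
  by_contra h
  rw [not_le, String.lt_iff_toList_lt] at h
  simp at h

theorem pvFoldMinEmpty (xs : List String) : xs.foldl min "" = "" := by
  induction xs with
  | nil => rfl
  | cons x t ih => simpa [min_eq_left (pvStrEmptyLe x)] using ih

theorem pvBest_nonneg (rows : List (Int × String)) : 0 ≤ pvBest rows :=
  (PySem.List.le_foldl_max (rows.map Prod.fst) 0).1

theorem pvBest_isMax (rows : List (Int × String)) : ∀ x ∈ rows, x.1 ≤ pvBest rows :=
  fun x hx => (PySem.List.le_foldl_max (rows.map Prod.fst) 0).2 x.1 (List.mem_map_of_mem hx)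

theorem pvBest_append (rows : List (Int × String)) (p : Int × String) :
    pvBest (rows ++ [p]) = max (pvBest rows) p.1 := by
  simp [pvBest, List.foldl_append]

theorem pvBest_attained (rows : List (Int × String)) :
    pvBest rows = 0 ∨ ∃ x ∈ rows, x.1 = pvBest rows := by
  rcases PySem.List.foldl_max_mem (rows.map Prod.fst) 0 with h | h
  · exact Or.inl h
  · rcases List.mem_map.mp h with ⟨x, hx, hfx⟩
    exact Or.inr ⟨x, hx, hfx⟩

theorem pvAugFilter_ne_nil (rows : List (Int × String)) :
    (((0, "") :: rows).filter (fun p => p.1 == pvBest rows)) ≠ [] := by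
  intro hnil
  rw [List.filter_eq_nil_iff] at hnil
  rcases pvBest_attained rows with h | ⟨x, hx, hfx⟩
  · exact hnil ((0, "") : Int × String) (List.mem_cons_self) (by simp [h])
  · exact hnil x (List.mem_cons_of_mem _ hx) (by simp [hfx])

theorem pvName_eq (rows : List (Int × String)) (q : Int × String) (t : List (Int × String))
    (h : ((0, "") :: rows).filter (fun p => p.1 == pvBest rows) = q :: t) :
    pvName rows = (t.map Prod.snd).foldl min q.2 := by
  unfold pvName
  rw [h]
  simp

theorem pvCore (rows : List (Int × String)) :
    rows.foldl pvStep ((0 : Int), ("" : String)) = (pvBest rows, pvName rows) := by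
  induction rows using List.reverseRecOn with
  | nil => rfl
  | append_singleton rows p ih =>
    obtain ⟨s, n⟩ := p
    rw [List.foldl_append, ih]
    have haug : ((0, "") :: (rows ++ [((s : Int), n)]))
        = ((0, "") :: rows) ++ [(s, n)] := rfl
    rcases lt_trichotomy (pvBest rows) s with hlt | heq | hgt
    · -- new row strictly beats the running best
      have hs0 : 0 < s := lt_of_le_of_lt (pvBest_nonneg rows) hlt
      have hbb : pvBest (rows ++ [(s, n)]) = s := by
        rw [pvBest_append]; exact max_eq_right hlt.le
      have hfilt : ((0, "") :: rows).filter (fun p => p.1 == s) = [] := by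
        rw [List.filter_eq_nil_iff]
        intro x hx
        rcases List.mem_cons.mp hx with rfl | hx
        · simp; omega
        · have := pvBest_isMax rows x hx; simp; omega
      have hname : pvName (rows ++ [(s, n)]) = n := by
        have h : ((0, "") :: (rows ++ [((s : Int), n)])).filter
            (fun p => p.1 == pvBest (rows ++ [(s, n)])) = [(s, n)] := by
          rw [hbb, haug, List.filter_append, hfilt]
          simp
        rw [pvName_eq _ _ _ h]
        rfl
      rw [hbb, hname]
      simp [pvStep, hlt]
    · -- tie with the running best
      have hbb : pvBest (rows ++ [(s, n)]) = pvBest rows := by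
        rw [pvBest_append, ← heq]; exact max_self _
      obtain ⟨q, t, hfo⟩ : ∃ q t, ((0, "") :: rows).filter (fun p => p.1 == pvBest rows) = q :: t := by
        rcases h : ((0, "") :: rows).filter (fun p => p.1 == pvBest rows) with _ | ⟨q, t⟩
        · exact absurd h (pvAugFilter_ne_nil rows)
        · exact ⟨q, t, h⟩
      have hold : pvName rows = (t.map Prod.snd).foldl min q.2 := pvName_eq _ _ _ hfo
      have hnew : pvName (rows ++ [(s, n)]) = min ((t.map Prod.snd).foldl min q.2) n := by
        have h : ((0, "") :: (rows ++ [((s : Int), n)])).filter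
            (fun p => p.1 == pvBest (rows ++ [(s, n)])) = q :: (t ++ [(s, n)]) := by
          rw [hbb, haug, List.filter_append, hfo]
          simp [heq]
        rw [pvName_eq _ _ _ h]
        simp [List.foldl_append]
      rw [hbb, hnew, hold]
      by_cases hnm : n < (t.map Prod.snd).foldl min q.2
      · simp [pvStep, heq, hnm, min_eq_right hnm.le]
      · simp [pvStep, heq, hnm, min_eq_left (not_lt.mp hnm)]
    · -- new row is strictly worse
      have hbb : pvBest (rows ++ [(s, n)]) = pvBest rows := by
        rw [pvBest_append]; exact max_eq_left hgt.le
      have hname : pvName (rows ++ [(s, n)]) = pvName rows := by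
        unfold pvName
        rw [hbb, haug, List.filter_append]
        have : ([((s : Int), n)].filter (fun p => p.1 == pvBest rows)) = [] := by
          simp; omega
        rw [this, List.append_nil]
      rw [hbb, hname]
      have h1 : ¬ s > pvBest rows := by omega
      have h2 : (s == pvBest rows) = false := by simp; omega
      simp [pvStep, h1, h2]

theorem pvSel (rows : List (Int × String)) :
    (let best := PySem.List.maxD (rows.map Prod.fst) (fun s => s) 0
     if best ≤ 0 then ""
     else (PySem.List.min? ((rows.filter (fun p => p.1 == best)).map Prod.snd) (fun n => n)).getD "")
    = pvName rows := by
  cases rows with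
  | nil => rfl
  | cons r rs =>
    have hmaxD : PySem.List.maxD (r.1 :: rs.map Prod.fst) (fun s => s) 0
        = (rs.map Prod.fst).foldl max r.1 := by
      show (PySem.List.max? (r.1 :: rs.map Prod.fst) (fun s => s)).getD 0 = _
      rw [PySem.List.max?_id_cons]
      rfl
    have hpb : pvBest (r :: rs) = max 0 ((rs.map Prod.fst).foldl max r.1) := by
      show List.foldl max (max 0 r.1) (rs.map Prod.fst) = _
      rw [List.foldl_assoc]
    by_cases hb : (rs.map Prod.fst).foldl max r.1 ≤ 0
    · -- every job scores ≤ 0: A's virtual initial (0, "") wins, B returns ""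
      have h0 : pvBest (r :: rs) = 0 := by rw [hpb]; exact max_eq_left hb
      have hfo : ((0, "") :: r :: rs).filter (fun p => p.1 == pvBest (r :: rs))
          = (0, "") :: ((r :: rs).filter (fun p => p.1 == pvBest (r :: rs))) :=
        List.filter_cons_of_pos (by simp [h0])
      rw [pvName_eq _ _ _ hfo]
      simp [hmaxD, hb, pvFoldMinEmpty]
    · rw [not_le] at hb
      have h0 : pvBest (r :: rs) = (rs.map Prod.fst).foldl max r.1 := by
        rw [hpb]; exact max_eq_right hb.le
      obtain ⟨x, hx, hfx⟩ : ∃ x ∈ r :: rs, x.1 = (rs.map Prod.fst).foldl max r.1 := by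
        rcases PySem.List.foldl_max_mem (rs.map Prod.fst) r.1 with h | h
        · exact ⟨r, List.mem_cons_self, h.symm⟩
        · rcases List.mem_map.mp h with ⟨x, hx, hfx⟩
          exact ⟨x, List.mem_cons_of_mem _ hx, hfx⟩
      obtain ⟨q, t, hfo⟩ : ∃ q t, (r :: rs).filter
          (fun p => p.1 == (rs.map Prod.fst).foldl max r.1) = q :: t := by
        rcases h : (r :: rs).filter (fun p => p.1 == (rs.map Prod.fst).foldl max r.1)
            with _ | ⟨q, t⟩
        · rw [List.filter_eq_nil_iff] at h
          exact absurd (by simp [hfx]) (h x hx)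
        · exact ⟨q, t, h⟩
      have hfo' : ((0, "") :: r :: rs).filter (fun p => p.1 == pvBest (r :: rs)) = q :: t := by
        rw [h0, List.filter_cons_of_neg (by simp; omega)]
        exact hfo
      have hmin : PySem.List.min? (q.2 :: t.map Prod.snd) (fun n => n)
          = some ((t.map Prod.snd).foldl min q.2) := PySem.List.min?_id_cons _ _
      rw [pvName_eq _ _ _ hfo']
      simp only [List.map_cons, hmaxD, hfo, hmin, if_neg (not_le.mpr hb)]
      simp

theorem pvA_eq_fold (table languages : List String) (preference : List Int) :
    solution table languages preference
      = ((table.map (pvEntry languages preference)).foldl pvStep ((0 : Int), ("" : String))).2 := by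
  have h := PySem.List.foldl_pyRange_zero_pyGetD table ""
      (fun st row => pvStep st (pvEntry languages preference row)) ((0 : Int), ("" : String))
  rw [List.foldl_map]
  exact congrArg Prod.snd h

-- ===== VERDICT (by name: the statement is the Claim_ definition above) =====
theorem solution_spec : Claim_equal_solution := by
  intro table languages preference _hdom _hpre
  unfold Spec_solution
  rw [pvA_eq_fold, pvCore, solution_alt, pvSel]
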